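-- pv_equiv track=rewrite | github.com/Patatfix/ALGO | Problème 2/Rendu machine à écrire/main.py | memo_cout_optimal
-- ===== SOURCE A (Python) =====
-- def memo_cout_optimal(liste_tailles_mots, L, i=0, d=None):
--
--     if d is None:
--         d = {}
--
--     if i == len(liste_tailles_mots):
--         return 0
--
--     if i in d:                          #si le coup à partir de l'indice i à déja été calculé, on le retourne directement.
--         return d[i]
--
--     cout_opt = []
--     longueur = 0
--     j = i
--     while j<len(liste_tailles_mots) and longueur + liste_tailles_mots[j] + (j-i) <= L:     #Pour tout les mots a partir de i jusqu'a ce qu'il y ait trop de caractères sur la ligne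
--
--         longueur += liste_tailles_mots[j]
--
--
--         cout_ligne = (L - (longueur + (j-i))) ** 2
--         cout_total = cout_ligne + memo_cout_optimal(liste_tailles_mots, L, j+1, d)
--         cout_opt.append(cout_total)
--         j+=1
--
--     d[i] = min(cout_opt)
--     return d[i]
-- ===== SOURCE B (Python) =====
-- # Bottom-up iterative DP (table from the end of the list down to i) instead of A's
-- # memoized top-down recursion; infeasible indices are marked None and propagate.
-- # Return-value equivalence only: A memoizes into the caller's dict d (mutating it),
-- # B never writes to d.
-- def memo_cout_optimal(liste_tailles_mots, L, i=0, d=None):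
--     n = len(liste_tailles_mots)
--     memo = {} if d is None else d
--     if i == n:
--         return 0
--     if i in memo:
--         return memo[i]
--     dp = {n: 0}
--     for k in range(n - 1, i - 1, -1):
--         if k in memo:
--             dp[k] = memo[k]
--             continue
--         best = None
--         longueur = 0
--         j = k
--         while j < n and longueur + liste_tailles_mots[j] + (j - k) <= L:
--             longueur += liste_tailles_mots[j]
--             sub = dp[j + 1]
--             if sub is not None:
--                 c = (L - (longueur + (j - k))) ** 2 + sub
--                 if best is None or c < best:
--                     best = c
--             j += 1
--         dp[k] = best
--     return dp[i]
-- ===== Notes on version B (the rewrite author's own statement) =====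
-- stated objective: alternative
-- what changed: Replaced A's memoized top-down recursion (threading a mutated dict through recursive calls) by a bottom-up iterative DP that fills a table dp[n]..dp[i] from the end of the list, marking infeasible indices None; A mutates the caller's dict d, B only reads it (return-value equivalence).
-- outside the precondition, e.g. on memo_cout_optimal([5, 9, 0, 100], 5, 0, {1: 7}): A returns 7, B returns 7; on memo_cout_optimal([5, 0, 100], 5, 0, {1: 0}): A returns 0, B returns 0
import Mathlib
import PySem

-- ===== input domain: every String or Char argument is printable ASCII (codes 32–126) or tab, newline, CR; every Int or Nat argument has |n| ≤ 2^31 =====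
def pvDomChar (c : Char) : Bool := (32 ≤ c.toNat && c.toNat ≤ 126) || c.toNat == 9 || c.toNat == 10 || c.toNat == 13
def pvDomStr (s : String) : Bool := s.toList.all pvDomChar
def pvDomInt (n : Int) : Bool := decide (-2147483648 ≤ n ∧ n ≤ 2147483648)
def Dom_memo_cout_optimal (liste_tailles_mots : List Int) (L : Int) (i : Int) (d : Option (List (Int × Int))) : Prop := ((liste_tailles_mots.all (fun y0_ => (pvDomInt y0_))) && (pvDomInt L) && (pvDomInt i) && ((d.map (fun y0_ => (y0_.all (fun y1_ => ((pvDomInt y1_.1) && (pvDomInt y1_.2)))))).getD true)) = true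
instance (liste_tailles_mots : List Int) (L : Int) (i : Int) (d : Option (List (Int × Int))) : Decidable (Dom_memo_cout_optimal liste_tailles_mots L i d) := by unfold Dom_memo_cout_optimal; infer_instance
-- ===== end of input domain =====

-- B replaces A's memoized top-down recursion by a bottom-up iterative DP table filled
-- from the end of the list down to i, with infeasible indices marked None (alternative
-- decomposition, same cost); A mutates the caller's dict d, B only reads it — the
-- equivalence proved is about the return value.

-- shared input decoding: the Python dict argument built from the association list
-- exactly as Python builds a dict (later duplicate keys overwrite, keeping position)
def pvDictOf (d : Option (List (Int × Int))) : PySem.Dict Int Int :=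
  (d.getD []).foldl (fun acc kv => acc.insert kv.1 kv.2) PySem.Dict.empty

-- ===== PORT A =====
-- A's recursion threads the mutated memo dict; fuel bounds the recursion depth
-- ((n - i).toNat + 1 at the top call provably suffices), loopA is the while-loop
-- (its jf counter likewise provably suffices: when jf = 0 the loop condition is false).
mutual
def memoA (xs : List Int) (L : Int) (fuel : Nat) (i : Int) (dd : PySem.Dict Int Int) :
    Int × PySem.Dict Int Int :=
  match fuel with
  | 0 => (0, dd)  -- fuel exhausted: unreachable from the top call
  | fuel + 1 =>
    if i = (xs.length : Int) then (0, dd)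
    else
      match dd.get? i with
      | some v => (v, dd)
      | none =>
        let r := loopA xs L fuel ((xs.length - i).toNat) i i 0 dd []
        -- Python: min(cout_opt) — raises ValueError on []; those inputs are outside Pre_
        let m := (PySem.List.min? r.1 (fun x => x)).getD 0
        (m, r.2.insert i m)
termination_by (fuel, 0)

def loopA (xs : List Int) (L : Int) (fuel : Nat) (jf : Nat) (i j longueur : Int)
    (dd : PySem.Dict Int Int) (acc : List Int) : List Int × PySem.Dict Int Int :=
  match jf with
  | 0 => (acc, dd)
  | jf + 1 =>
    if j < (xs.length : Int) ∧ longueur + PySem.List.pyGetD xs j 0 + (j - i) ≤ L then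
      let longueur' := longueur + PySem.List.pyGetD xs j 0
      let cout_ligne := (L - (longueur' + (j - i))) ^ 2
      let r := memoA xs L fuel (j + 1) dd
      loopA xs L fuel jf i (j + 1) longueur' r.2 (acc ++ [cout_ligne + r.1])
    else (acc, dd)
termination_by (fuel, jf)
end

def memo_cout_optimal (liste_tailles_mots : List Int) (L : Int) (i : Int)
    (d : Option (List (Int × Int))) : Int :=
  (memoA liste_tailles_mots L (((liste_tailles_mots.length : Int) - i).toNat + 1) i
    (pvDictOf d)).1

-- ===== PORT B =====
-- the inner while-loop of B, with a running minimum `best` (none = Python None);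
-- dp stores Option Int values (None marks an infeasible index).
-- dp.getD (j+1) none: j+1 always lies in (k, n], where dp has an entry, so a missing
-- key (Python KeyError) cannot occur here.
def bLoopB (xs : List Int) (L : Int) (dp : PySem.Dict Int (Option Int)) (jf : Nat)
    (k j longueur : Int) (best : Option Int) : Option Int :=
  match jf with
  | 0 => best  -- when jf = 0 the loop condition is false anyway
  | jf + 1 =>
    if j < (xs.length : Int) ∧ longueur + PySem.List.pyGetD xs j 0 + (j - k) ≤ L then
      let longueur' := longueur + PySem.List.pyGetD xs j 0
      match dp.getD (j + 1) none with
      | none => bLoopB xs L dp jf k (j + 1) longueur' best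
      | some s =>
        let c := (L - (longueur' + (j - k))) ^ 2 + s
        bLoopB xs L dp jf k (j + 1) longueur'
          (some (match best with | none => c | some b => if c < b then c else b))
    else best

-- the for-loop `for k in range(n-1, i-1, -1)`, kf = number of iterations
def bMainB (xs : List Int) (L : Int) (memo : PySem.Dict Int Int) (kf : Nat) (k : Int)
    (dp : PySem.Dict Int (Option Int)) : PySem.Dict Int (Option Int) :=
  match kf with
  | 0 => dp
  | kf + 1 =>
    let v : Option Int :=
      match memo.get? k with
      | some v => some v
      | none => bLoopB xs L dp ((xs.length - k).toNat) k k 0 none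
    bMainB xs L memo kf (k - 1) (dp.insert k v)

def memo_cout_optimal_alt (liste_tailles_mots : List Int) (L : Int) (i : Int)
    (d : Option (List (Int × Int))) : Int :=
  let n : Int := liste_tailles_mots.length
  let memo := pvDictOf d
  if i = n then 0
  else
    match memo.get? i with
    | some v => v
    | none =>
      let dp := bMainB liste_tailles_mots L memo (n - i).toNat (n - 1)
        (PySem.Dict.empty.insert n (some 0))
      -- Python `return dp[i]`: under Pre_ the entry exists and is an int, never None
      match dp.getD i none with
      | some v => v
      | none => 0

-- ===== PRECONDITION & SPEC =====
-- Pre_ excludes the inputs on which A raises (IndexError for i beyond [-n, n];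
-- ValueError from min([]) when the recursion reaches an unmemoized word longer than L),
-- and — because exact reachability through the memo dict is not a closed-form shape —
-- also a few inputs on which A still returns because the over-long word happens to be
-- unreachable from i; on every such excluded-but-returning input B returns A's value too
-- (see the cites).
def Pre_memo_cout_optimal (liste_tailles_mots : List Int) (L : Int) (i : Int)
    (d : Option (List (Int × Int))) : Prop :=
  ((pvDictOf d).get? i).isSome = true ∨
  (-(liste_tailles_mots.length : Int) ≤ i ∧ i ≤ (liste_tailles_mots.length : Int) ∧
  ∀ m : Nat, m < ((liste_tailles_mots.length : Int) - i).toNat →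
    ((pvDictOf d).get? (i + m)).isSome = true ∨
      PySem.List.pyGetD liste_tailles_mots (i + m) 0 ≤ L)
instance (liste_tailles_mots : List Int) (L : Int) (i : Int) (d : Option (List (Int × Int))) : Decidable (Pre_memo_cout_optimal liste_tailles_mots L i d) := by unfold Pre_memo_cout_optimal; infer_instance

def pvWitness_memo_cout_optimal : List Int × Int × Int × (Option (List (Int × Int))) :=
  ([1, 2], 5, 0, none)

def Spec_memo_cout_optimal (liste_tailles_mots : List Int) (L : Int) (i : Int) (d : Option (List (Int × Int))) (out : Int) : Prop := out = memo_cout_optimal_alt liste_tailles_mots L i d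
instance (liste_tailles_mots : List Int) (L : Int) (i : Int) (d : Option (List (Int × Int))) (out : Int) : Decidable (Spec_memo_cout_optimal liste_tailles_mots L i d out) := by unfold Spec_memo_cout_optimal; infer_instance

-- ===== CLAIM (what is proved, stated in full; the proofs are below) =====
def Claim_equal_memo_cout_optimal : Prop := ∀ (liste_tailles_mots : List Int) (L : Int) (i : Int) (d : Option (List (Int × Int))), Dom_memo_cout_optimal liste_tailles_mots L i d → Pre_memo_cout_optimal liste_tailles_mots L i d → Spec_memo_cout_optimal liste_tailles_mots L i d (memo_cout_optimal liste_tailles_mots L i d)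

-- ===== LEMMAS AND PROOFS =====

-- the common value function: gA k = cost from index k, consulting the ORIGINAL memo d0;
-- gL is the list of per-line candidate costs the while-loop collects
mutual
def gA (xs : List Int) (L : Int) (d0 : PySem.Dict Int Int) (k : Int) : Int :=
  if k = (xs.length : Int) then 0
  else
    match d0.get? k with
    | some v => v
    | none => (PySem.List.min? (gL xs L d0 k k 0) (fun x => x)).getD 0
termination_by ((((xs.length : Int) - k).toNat), 1)

def gL (xs : List Int) (L : Int) (d0 : PySem.Dict Int Int) (k j longueur : Int) : List Int :=
  if h : j < (xs.length : Int) ∧ longueur + PySem.List.pyGetD xs j 0 + (j - k) ≤ L then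
    let longueur' := longueur + PySem.List.pyGetD xs j 0
    ((L - (longueur' + (j - k))) ^ 2 + gA xs L d0 (j + 1)) :: gL xs L d0 k (j + 1) longueur'
  else []
termination_by ((((xs.length : Int) - j).toNat), 0)
decreasing_by
  · exact Prod.Lex.left _ _ (by omega)
  · exact Prod.Lex.left _ _ (by omega)
end

-- list of candidate costs folded with Python's running minimum (first minimum kept)
def pvFoldBest (best : Option Int) (l : List Int) : Option Int :=
  l.foldl (fun b c => some (match b with | none => c | some x => if c < x then c else x)) best

-- invariant of A's threaded memo dict: every entry (except a possible key n, which A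
-- never reads) stores the gA-value of its index
def pvInv (xs : List Int) (L : Int) (d0 dd : PySem.Dict Int Int) : Prop :=
  ∀ m v, dd.get? m = some v → m = (xs.length : Int) ∨ gA xs L d0 m = v

def pvSup (d0 dd : PySem.Dict Int Int) : Prop :=
  ∀ m v, d0.get? m = some v → dd.get? m = some v

theorem pv_gA_of_get?_eq_some (xs : List Int) (L : Int) (d0 : PySem.Dict Int Int)
    (m : Int) (v : Int) (hm : m ≠ (xs.length : Int)) (h : d0.get? m = some v) :
    gA xs L d0 m = v := by
  rw [gA, if_neg hm, h]

theorem pv_gA_none (xs : List Int) (L : Int) (d0 : PySem.Dict Int Int) (m : Int)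
    (hm : m ≠ (xs.length : Int)) (h : d0.get? m = none) :
    gA xs L d0 m = (PySem.List.min? (gL xs L d0 m m 0) (fun x => x)).getD 0 := by
  rw [gA, if_neg hm, h]

theorem pv_gL_stop (xs : List Int) (L : Int) (d0 : PySem.Dict Int Int)
    (k j longueur : Int) (hj : ¬ (j < (xs.length : Int) ∧ longueur + PySem.List.pyGetD xs j 0 + (j - k) ≤ L)) :
    gL xs L d0 k j longueur = [] := by
  rw [gL, dif_neg hj]

theorem pv_gL_step (xs : List Int) (L : Int) (d0 : PySem.Dict Int Int)
    (k j longueur : Int) (hj : j < (xs.length : Int) ∧ longueur + PySem.List.pyGetD xs j 0 + (j - k) ≤ L) :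
    gL xs L d0 k j longueur =
      ((L - ((longueur + PySem.List.pyGetD xs j 0) + (j - k))) ^ 2 + gA xs L d0 (j + 1)) ::
        gL xs L d0 k (j + 1) (longueur + PySem.List.pyGetD xs j 0) := by
  rw [gL, dif_pos hj]

-- A's while-loop produces exactly gL and only extends the dict at indices above k
theorem pv_loopA (xs : List Int) (L : Int) (d0 : PySem.Dict Int Int) (fuel : Nat)
    (HP : ∀ (k : Int) (dd : PySem.Dict Int Int), ((xs.length : Int) - k).toNat < fuel →
      pvInv xs L d0 dd → pvSup d0 dd →
      (memoA xs L fuel k dd).1 = gA xs L d0 k ∧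
      pvInv xs L d0 (memoA xs L fuel k dd).2 ∧
      (∀ m v, dd.get? m = some v → (memoA xs L fuel k dd).2.get? m = some v) ∧
      (∀ m, m < k → (memoA xs L fuel k dd).2.get? m = dd.get? m)) :
    ∀ (jf : Nat) (k j longueur : Int) (dd : PySem.Dict Int Int) (acc : List Int),
      pvInv xs L d0 dd → pvSup d0 dd → k ≤ j →
      ((xs.length : Int) - j).toNat ≤ jf → ((xs.length : Int) - j).toNat ≤ fuel →
      (loopA xs L fuel jf k j longueur dd acc).1 = acc ++ gL xs L d0 k j longueur ∧
      pvInv xs L d0 (loopA xs L fuel jf k j longueur dd acc).2 ∧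
      (∀ m v, dd.get? m = some v → (loopA xs L fuel jf k j longueur dd acc).2.get? m = some v) ∧
      (∀ m, m ≤ k → (loopA xs L fuel jf k j longueur dd acc).2.get? m = dd.get? m) := by
  intro jf
  induction jf with
  | zero =>
    intro k j longueur dd acc hInv hSup hkj hjf hfu
    have hstep : loopA xs L fuel 0 k j longueur dd acc = (acc, dd) := by rw [loopA]
    rw [pv_gL_stop xs L d0 k j longueur (by intro hc; omega), hstep]
    exact ⟨(List.append_nil acc).symm, hInv, fun m v h => h, fun m _ => rfl⟩
  | succ jf ih =>
    intro k j longueur dd acc hInv hSup hkj hjf hfu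
    by_cases hc : j < (xs.length : Int) ∧ longueur + PySem.List.pyGetD xs j 0 + (j - k) ≤ L
    · have hfu' : ((xs.length : Int) - (j + 1)).toNat < fuel := by omega
      obtain ⟨P1, P2, P3, P4⟩ := HP (j + 1) dd hfu' hInv hSup
      have hSup' : pvSup d0 (memoA xs L fuel (j + 1) dd).2 := fun m v h => P3 m v (hSup m v h)
      obtain ⟨Q1, Q2, Q3, Q4⟩ := ih k (j + 1) (longueur + PySem.List.pyGetD xs j 0)
        (memoA xs L fuel (j + 1) dd).2
        (acc ++ [(L - ((longueur + PySem.List.pyGetD xs j 0) + (j - k))) ^ 2 + (memoA xs L fuel (j + 1) dd).1])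
        P2 hSup' (by omega) (by omega) (by omega)
      have hstep : loopA xs L fuel (jf + 1) k j longueur dd acc =
          loopA xs L fuel jf k (j + 1) (longueur + PySem.List.pyGetD xs j 0)
            (memoA xs L fuel (j + 1) dd).2
            (acc ++ [(L - ((longueur + PySem.List.pyGetD xs j 0) + (j - k))) ^ 2 + (memoA xs L fuel (j + 1) dd).1]) := by
        conv_lhs => rw [loopA]
        rw [if_pos hc]
      rw [hstep]
      refine ⟨?_, Q2, ?_, ?_⟩
      · rw [Q1, pv_gL_step xs L d0 k j longueur hc, P1]
        simp [List.append_assoc]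
      · exact fun m v h => Q3 m v (P3 m v h)
      · intro m hm
        rw [Q4 m hm, P4 m (by omega)]
    · rw [pv_gL_stop xs L d0 k j longueur hc]
      have hstep : loopA xs L fuel (jf + 1) k j longueur dd acc = (acc, dd) := by
        rw [loopA, if_neg hc]
      rw [hstep]
      exact ⟨by simp, hInv, fun m v h => h, fun m _ => rfl⟩

-- A's memoized recursion returns gA and keeps the dict invariant
theorem pv_memoA (xs : List Int) (L : Int) (d0 : PySem.Dict Int Int) :
    ∀ (fuel : Nat) (k : Int) (dd : PySem.Dict Int Int), ((xs.length : Int) - k).toNat < fuel →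
      pvInv xs L d0 dd → pvSup d0 dd →
      (memoA xs L fuel k dd).1 = gA xs L d0 k ∧
      pvInv xs L d0 (memoA xs L fuel k dd).2 ∧
      (∀ m v, dd.get? m = some v → (memoA xs L fuel k dd).2.get? m = some v) ∧
      (∀ m, m < k → (memoA xs L fuel k dd).2.get? m = dd.get? m) := by
  intro fuel
  induction fuel with
  | zero => intro k dd h; omega
  | succ fuel ih =>
    intro k dd hf hInv hSup
    by_cases hk : k = (xs.length : Int)
    · have h0 : memoA xs L (fuel + 1) k dd = (0, dd) := by rw [memoA, if_pos hk]
      rw [h0]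
      refine ⟨?_, hInv, fun m v h => h, fun m _ => rfl⟩
      rw [gA, if_pos hk]
    · cases hdk : dd.get? k with
      | some v =>
        have h0 : memoA xs L (fuel + 1) k dd = (v, dd) := by rw [memoA, if_neg hk, hdk]
        rw [h0]
        refine ⟨?_, hInv, fun m v h => h, fun m _ => rfl⟩
        rcases hInv k v hdk with h | h
        · exact absurd h hk
        · exact h.symm
      | none =>
        have hd0k : d0.get? k = none := by
          cases hd : d0.get? k with
          | none => rfl
          | some w => rw [hSup k w hd] at hdk; exact absurd hdk (by simp)
        obtain ⟨Q1, Q2, Q3, Q4⟩ := pv_loopA xs L d0 fuel ih ((xs.length - k).toNat) k k 0 dd []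
          hInv hSup le_rfl le_rfl (by omega)
        have hval : (PySem.List.min? (loopA xs L fuel ((xs.length - k).toNat) k k 0 dd []).1 (fun x => x)).getD 0
            = gA xs L d0 k := by
          rw [Q1, List.nil_append, pv_gA_none xs L d0 k hk hd0k]
        have h0 : memoA xs L (fuel + 1) k dd =
            ((PySem.List.min? (loopA xs L fuel ((xs.length - k).toNat) k k 0 dd []).1 (fun x => x)).getD 0,
              (loopA xs L fuel ((xs.length - k).toNat) k k 0 dd []).2.insert k
                ((PySem.List.min? (loopA xs L fuel ((xs.length - k).toNat) k k 0 dd []).1 (fun x => x)).getD 0)) := by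
          rw [memoA, if_neg hk, hdk]
        rw [h0]
        refine ⟨hval, ?_, ?_, ?_⟩
        · intro m v h
          rw [PySem.Dict.get?_insert] at h
          by_cases hmk : m = k
          · rw [if_pos hmk] at h
            rw [hval] at h
            right
            rw [hmk]
            exact Option.some.inj h
          · rw [if_neg hmk] at h
            exact Q2 m v h
        · intro m v h
          have hmk : m ≠ k := by
            intro he; rw [he, hdk] at h; exact absurd h (by simp)
          rw [PySem.Dict.get?_insert, if_neg hmk]
          exact Q3 m v h
        · intro m hm
          rw [PySem.Dict.get?_insert, if_neg (by omega : m ≠ k)]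
          exact Q4 m (by omega)

-- B's inner while-loop folds the gL list with the running minimum (under the dp
-- invariant every dp value it reads is a some, so the None branch never fires)
theorem pv_bLoop (xs : List Int) (L : Int) (d0 : PySem.Dict Int Int) (k : Int)
    (dp : PySem.Dict Int (Option Int))
    (hdp : ∀ m : Int, k < m → m ≤ (xs.length : Int) → dp.get? m = some (some (gA xs L d0 m))) :
    ∀ (jf : Nat) (j longueur : Int) (best : Option Int), k ≤ j →
      ((xs.length : Int) - j).toNat ≤ jf →
      bLoopB xs L dp jf k j longueur best = pvFoldBest best (gL xs L d0 k j longueur) := by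
  intro jf
  induction jf with
  | zero =>
    intro j longueur best hkj hjf
    rw [pv_gL_stop xs L d0 k j longueur (by intro hc; omega)]
    rfl
  | succ jf ih =>
    intro j longueur best hkj hjf
    by_cases hc : j < (xs.length : Int) ∧ longueur + PySem.List.pyGetD xs j 0 + (j - k) ≤ L
    · have hget : dp.getD (j + 1) none = some (gA xs L d0 (j + 1)) := by
        rw [PySem.Dict.getD_eq_get?_getD, hdp (j + 1) (by omega) (by omega)]
        rfl
      have hstep : bLoopB xs L dp (jf + 1) k j longueur best =
          bLoopB xs L dp jf k (j + 1) (longueur + PySem.List.pyGetD xs j 0)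
            (some (match best with
              | none => (L - ((longueur + PySem.List.pyGetD xs j 0) + (j - k))) ^ 2 + gA xs L d0 (j + 1)
              | some b =>
                if (L - ((longueur + PySem.List.pyGetD xs j 0) + (j - k))) ^ 2 + gA xs L d0 (j + 1) < b
                then (L - ((longueur + PySem.List.pyGetD xs j 0) + (j - k))) ^ 2 + gA xs L d0 (j + 1)
                else b)) := by
        conv_lhs => rw [bLoopB]
        rw [if_pos hc, hget]
      rw [hstep, ih (j + 1) (longueur + PySem.List.pyGetD xs j 0) _ (by omega) (by omega),
        pv_gL_step xs L d0 k j longueur hc]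
      rfl
    · rw [pv_gL_stop xs L d0 k j longueur hc]
      rw [bLoopB, if_neg hc]
      rfl

theorem pv_foldBest_some : ∀ (t : List Int) (b : Int),
    pvFoldBest (some b) t = some (t.foldl min b) := by
  intro t
  induction t with
  | nil => intro b; rfl
  | cons c t ih =>
    intro b
    have h1 : pvFoldBest (some b) (c :: t) = pvFoldBest (some (if c < b then c else b)) t := rfl
    have h2 : (if c < b then c else b) = min b c := by rw [min_def]; split_ifs <;> omega
    rw [h1, h2, ih]
    rfl

theorem pv_foldBest_min (l : List Int) (hl : l ≠ []) :
    pvFoldBest none l = some ((PySem.List.min? l (fun x => x)).getD 0) := by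
  cases l with
  | nil => exact absurd rfl hl
  | cons x t =>
    have h1 : pvFoldBest none (x :: t) = pvFoldBest (some x) t := rfl
    rw [h1, pv_foldBest_some, PySem.List.min?_id_cons]
    rfl

-- B's descending for-loop fills dp with some (gA m) on (k - kf, n], provided every
-- index in that range is memoized or carries a word that fits alone (Pre_'s clause)
theorem pv_bMain (xs : List Int) (L : Int) (d0 : PySem.Dict Int Int) :
    ∀ (kf : Nat) (k : Int) (dp : PySem.Dict Int (Option Int)), k < (xs.length : Int) →
      (∀ m : Int, k - kf < m → m < (xs.length : Int) →
        (d0.get? m).isSome = true ∨ PySem.List.pyGetD xs m 0 ≤ L) →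
      (∀ m : Int, k < m → m ≤ (xs.length : Int) → dp.get? m = some (some (gA xs L d0 m))) →
      ∀ m : Int, k - kf < m → m ≤ (xs.length : Int) →
        (bMainB xs L d0 kf k dp).get? m = some (some (gA xs L d0 m)) := by
  intro kf
  induction kf with
  | zero =>
    intro k dp hk hpre hdp m hm1 hm2
    exact hdp m (by omega) hm2
  | succ kf ih =>
    intro k dp hk hpre hdp m hm1 hm2
    have hkn : k ≠ (xs.length : Int) := by omega
    have hv : (match d0.get? k with
        | some v => some v
        | none => bLoopB xs L dp ((xs.length - k).toNat) k k 0 none) = some (gA xs L d0 k) := by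
      cases hd : d0.get? k with
      | some v => simp [pv_gA_of_get?_eq_some xs L d0 k v hkn hd]
      | none =>
        have hfit : PySem.List.pyGetD xs k 0 ≤ L := by
          rcases hpre k (by omega) (by omega) with h | h
          · rw [hd] at h; exact absurd h (by simp)
          · exact h
        have hne : gL xs L d0 k k 0 ≠ [] := by
          rw [pv_gL_step xs L d0 k k 0 ⟨by omega, by omega⟩]
          exact List.cons_ne_nil _ _
        rw [pv_bLoop xs L d0 k dp hdp ((xs.length - k).toNat) k 0 none le_rfl (by omega)]
        rw [pv_foldBest_min _ hne, pv_gA_none xs L d0 k hkn hd]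
    have hstep : bMainB xs L d0 (kf + 1) k dp =
        bMainB xs L d0 kf (k - 1) (dp.insert k (some (gA xs L d0 k))) := by
      rw [bMainB, hv]
    rw [hstep]
    refine ih (k - 1) (dp.insert k (some (gA xs L d0 k))) (by omega)
      (fun m' h1 h2 => hpre m' (by push_cast at h1 ⊢; omega) h2) ?_ m
      (by push_cast at hm1 ⊢; omega) hm2
    intro m' hm1' hm2'
    rw [PySem.Dict.get?_insert]
    by_cases hmk : m' = k
    · rw [if_pos hmk, hmk]
    · rw [if_neg hmk]
      exact hdp m' (by omega) hm2'

-- main equality: both ports compute gA i under Pre_'s word condition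
theorem pv_main (xs : List Int) (L : Int) (i : Int) (d : Option (List (Int × Int)))
    (_hlo : -(xs.length : Int) ≤ i) (hi : i ≤ (xs.length : Int))
    (hw : ∀ m : Nat, m < ((xs.length : Int) - i).toNat →
      ((pvDictOf d).get? (i + m)).isSome = true ∨ PySem.List.pyGetD xs (i + m) 0 ≤ L) :
    memo_cout_optimal xs L i d = memo_cout_optimal_alt xs L i d := by
  have hInv0 : pvInv xs L (pvDictOf d) (pvDictOf d) := by
    intro m v h
    by_cases hm : m = (xs.length : Int)
    · exact Or.inl hm
    · exact Or.inr (pv_gA_of_get?_eq_some xs L (pvDictOf d) m v hm h)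
  have hSup0 : pvSup (pvDictOf d) (pvDictOf d) := fun m v h => h
  have hA : memo_cout_optimal xs L i d = gA xs L (pvDictOf d) i :=
    (pv_memoA xs L (pvDictOf d) (((xs.length : Int) - i).toNat + 1) i (pvDictOf d)
      (by omega) hInv0 hSup0).1
  have hpre : ∀ m : Int, ((xs.length : Int) - 1) - (((xs.length : Int) - i).toNat : Int) < m →
      m < (xs.length : Int) →
      ((pvDictOf d).get? m).isSome = true ∨ PySem.List.pyGetD xs m 0 ≤ L := by
    intro m h1 h2
    have hm : ((m - i).toNat : Int) = m - i := by omega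
    have := hw (m - i).toNat (by omega)
    rwa [hm, add_sub_cancel] at this
  have hdp0 : ∀ m : Int, (xs.length : Int) - 1 < m → m ≤ (xs.length : Int) →
      (PySem.Dict.empty.insert (xs.length : Int) (some 0)).get? m
        = some (some (gA xs L (pvDictOf d) m)) := by
    intro m hm1 hm2
    have hm : m = (xs.length : Int) := by omega
    rw [hm, PySem.Dict.get?_insert, if_pos rfl]
    rw [gA, if_pos rfl]
  have hB : (bMainB xs L (pvDictOf d) ((xs.length : Int) - i).toNat ((xs.length : Int) - 1)
      (PySem.Dict.empty.insert (xs.length : Int) (some 0))).get? i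
        = some (some (gA xs L (pvDictOf d) i)) :=
    pv_bMain xs L (pvDictOf d) ((xs.length : Int) - i).toNat ((xs.length : Int) - 1)
      (PySem.Dict.empty.insert (xs.length : Int) (some 0)) (by omega) hpre hdp0 i (by omega) hi
  rw [hA]
  unfold memo_cout_optimal_alt
  by_cases hin : i = (xs.length : Int)
  · rw [if_pos hin, hin, gA, if_pos rfl]
  · rw [if_neg hin]
    cases hd : (pvDictOf d).get? i with
    | some v =>
      show gA xs L (pvDictOf d) i = v
      exact pv_gA_of_get?_eq_some xs L (pvDictOf d) i v hin hd
    | none =>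
      show gA xs L (pvDictOf d) i =
        (match (bMainB xs L (pvDictOf d) ((xs.length : Int) - i).toNat ((xs.length : Int) - 1)
          (PySem.Dict.empty.insert (xs.length : Int) (some 0))).getD i none with
         | some v => v
         | none => 0)
      rw [PySem.Dict.getD_eq_get?_getD, hB]
      rfl

-- when index i itself is memoized (or i = n), both programs return at once
theorem pv_hit (xs : List Int) (L : Int) (i : Int) (d : Option (List (Int × Int)))
    (h : ((pvDictOf d).get? i).isSome = true) :
    memo_cout_optimal xs L i d = memo_cout_optimal_alt xs L i d := by
  by_cases hin : i = (xs.length : Int)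
  · have hA : memo_cout_optimal xs L i d = 0 := by
      unfold memo_cout_optimal
      rw [memoA, if_pos hin]
    have hB : memo_cout_optimal_alt xs L i d = 0 := by
      unfold memo_cout_optimal_alt
      rw [if_pos hin]
    rw [hA, hB]
  · obtain ⟨v, hv⟩ := Option.isSome_iff_exists.mp h
    have hA : memo_cout_optimal xs L i d = v := by
      unfold memo_cout_optimal
      rw [memoA, if_neg hin, hv]
    have hB : memo_cout_optimal_alt xs L i d = v := by
      unfold memo_cout_optimal_alt
      rw [if_neg hin, hv]
    rw [hA, hB]

-- ===== VERDICT (by name: the statement is the Claim_ definition above) =====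
theorem memo_cout_optimal_spec : Claim_equal_memo_cout_optimal := by
  intro xs L i d _hdom hpre
  unfold Spec_memo_cout_optimal
  rcases hpre with h | h
  · exact pv_hit xs L i d h
  · exact pv_main xs L i d h.1 h.2.1 h.2.2
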